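-- pv_equiv track=rewrite | github.com/kunimi00/TweetSentimentAnalysis | elliot/src/embeddings.py | process_for_doc2vec
-- ===== SOURCE A (Python) =====
-- import string
--
-- def process_for_doc2vec(tweets, labels, pos_start=0, neu_start=0, neg_start=0):
--     """
--     Change format of tweets and labels in annotated labels (positive_0, positive_1, neutral_0...) and list of tokens
--     Necessary for TaggedDocument from gensim
--     :param tweets: list of strings (tweets)
--     :param labels: list of strings (labels)
--     :param pos_start: a potential initial index for labeling (useful in order to stack several sources for training)
--     :param neu_start: a potential initial index for labeling (useful in order to stack several sources for training)
--     :param neg_start: a potential initial index for labeling (useful in order to stack several sources for training)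
--     :return:
--     """
--     positives, neutrals, negatives = [], [], []
--     for i, t in enumerate(zip(tweets, labels)):
--             if t[1] == 'positive':
--                 positives.append(t)
--             if t[1] == 'neutral':
--                 neutrals.append(t)
--             if t[1] == 'negative':
--                  negatives.append(t)
--     pos, neu, neg = [], [], []
--
--     for i,t in enumerate(positives):
--         tup = (t[0], t[1] + "_" + str(pos_start + i))
--         pos.append(tup)
--     for i,t in enumerate(neutrals):
--         tup = (t[0], t[1] + "_" + str(neu_start + i))
--         neu.append(tup)
--     for i,t in enumerate(negatives):
--         tup = (t[0], t[1] + "_" + str(neg_start + i))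
--         neg.append(tup)
--     tweets = [t[0] for t in pos+neu+neg]
--     labels = [t[1] for t in pos+neu+neg]
--
--     strip_tweets = []
--     sentences = []
--     translator = str.maketrans('', '', string.punctuation)
--     for t in tweets:
--         strip_tweets.append(t.translate(translator).lower())
--     for t in strip_tweets:
--         words = t.split(' ')
--         sentences.append(words)
--     return sentences, labels
-- ===== SOURCE B (Python) =====
-- import string
--
-- def process_for_doc2vec(tweets, labels, pos_start=0, neu_start=0, neg_start=0):
--     # Single pass over zip(tweets, labels) with three running counters; tokens and
--     # tagged label are computed inline, then the three groups are concatenated and unzipped.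
--     translator = str.maketrans('', '', string.punctuation)
--     pos, neu, neg = [], [], []
--     pi = ni = gi = 0
--     for text, label in zip(tweets, labels):
--         if label == 'positive':
--             pos.append((text.translate(translator).lower().split(' '), label + '_' + str(pos_start + pi)))
--             pi += 1
--         elif label == 'neutral':
--             neu.append((text.translate(translator).lower().split(' '), label + '_' + str(neu_start + ni)))
--             ni += 1
--         elif label == 'negative':
--             neg.append((text.translate(translator).lower().split(' '), label + '_' + str(neg_start + gi)))
--             gi += 1
--     tagged = pos + neu + neg
--     return [w for w, _ in tagged], [l for _, l in tagged]
-- ===== Notes on version B (the rewrite author's own statement) =====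
-- stated objective: simpler
-- what changed: A's six sequential passes (group by label, three enumerate-retag loops, rebuild tweets/labels, strip pass, split pass) are fused into one pass over zip(tweets, labels) with three running counters that tokenizes and tags each tweet inline, followed by a single concatenate-and-unzip.
import Mathlib
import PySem

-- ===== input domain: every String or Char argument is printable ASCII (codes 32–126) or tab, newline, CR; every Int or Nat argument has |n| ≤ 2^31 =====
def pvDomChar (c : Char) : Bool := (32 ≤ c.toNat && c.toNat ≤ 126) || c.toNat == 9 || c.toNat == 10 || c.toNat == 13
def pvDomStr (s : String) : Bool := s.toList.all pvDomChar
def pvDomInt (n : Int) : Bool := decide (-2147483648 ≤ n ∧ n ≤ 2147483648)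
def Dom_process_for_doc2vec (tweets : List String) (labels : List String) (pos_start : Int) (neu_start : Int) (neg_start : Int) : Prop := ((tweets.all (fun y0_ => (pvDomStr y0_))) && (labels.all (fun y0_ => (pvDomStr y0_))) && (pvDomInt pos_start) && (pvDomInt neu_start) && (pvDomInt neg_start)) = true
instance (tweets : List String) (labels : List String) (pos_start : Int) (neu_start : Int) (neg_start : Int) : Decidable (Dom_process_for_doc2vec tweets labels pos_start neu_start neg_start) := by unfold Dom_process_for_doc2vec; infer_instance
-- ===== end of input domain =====

-- B fuses A's six sequential passes into a single pass over zip(tweets, labels) with three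
-- running counters, tokenizing and tagging inline; same return value (objective: simpler).

-- shared primitive helpers (Python built-ins both programs call):
-- string.punctuation
def pyPunct : List Char := "!\"#$%&'()*+,-./:;<=>?@[\\]^_`{|}~".toList
-- t.translate(str.maketrans('', '', string.punctuation)) — ported by hand: the translator
-- DELETES exactly the punctuation characters, i.e. a filter over the code points (exact).
def pyDelPunct (s : String) : String := String.ofList (s.toList.filter (fun c => !pyPunct.contains c))
-- t.split(' ') — sep " " ≠ "", so PySem.Str.split? never returns none; getD [] is unreachable
def pySplitSpace (t : String) : List String := (PySem.Str.split? t " ").getD []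

-- ===== PORT A =====
def process_for_doc2vec (tweets : List String) (labels : List String) (pos_start : Int) (neu_start : Int) (neg_start : Int) : List (List String) × List String :=
  -- for i, t in enumerate(zip(tweets, labels)): three independent ifs appending t
  let groups := (PySem.List.enumerate (tweets.zip labels)).foldl
    (fun (acc : List (String × String) × List (String × String) × List (String × String)) it =>
      let t := it.2
      let acc := if t.2 == "positive" then (acc.1 ++ [t], acc.2.1, acc.2.2) else acc
      let acc := if t.2 == "neutral" then (acc.1, acc.2.1 ++ [t], acc.2.2) else acc
      if t.2 == "negative" then (acc.1, acc.2.1, acc.2.2 ++ [t]) else acc)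
    ([], [], [])
  -- three enumerate-retag loops
  let pos := (PySem.List.enumerate groups.1).foldl
    (fun acc (p : Int × (String × String)) => acc ++ [(p.2.1, p.2.2 ++ "_" ++ PySem.Int.toStr (pos_start + p.1))]) []
  let neu := (PySem.List.enumerate groups.2.1).foldl
    (fun acc (p : Int × (String × String)) => acc ++ [(p.2.1, p.2.2 ++ "_" ++ PySem.Int.toStr (neu_start + p.1))]) []
  let neg := (PySem.List.enumerate groups.2.2).foldl
    (fun acc (p : Int × (String × String)) => acc ++ [(p.2.1, p.2.2 ++ "_" ++ PySem.Int.toStr (neg_start + p.1))]) []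
  let tweets2 := (pos ++ neu ++ neg).map (fun t => t.1)
  let labels2 := (pos ++ neu ++ neg).map (fun t => t.2)
  -- strip pass, then split pass
  let strip_tweets := tweets2.foldl (fun acc t => acc ++ [PySem.Str.lower (pyDelPunct t)]) []
  let sentences := strip_tweets.foldl (fun acc t => acc ++ [pySplitSpace t]) []
  (sentences, labels2)

-- ===== PORT B =====
def process_for_doc2vec_alt (tweets : List String) (labels : List String) (pos_start : Int) (neu_start : Int) (neg_start : Int) : List (List String) × List String :=
  let st := (tweets.zip labels).foldl
    (fun (st : (List (List String × String) × List (List String × String) × List (List String × String)) × (Int × Int × Int)) tl =>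
      let text := tl.1; let label := tl.2
      if label == "positive" then
        ((st.1.1 ++ [(pySplitSpace (PySem.Str.lower (pyDelPunct text)), label ++ "_" ++ PySem.Int.toStr (pos_start + st.2.1))], st.1.2.1, st.1.2.2),
         (st.2.1 + 1, st.2.2.1, st.2.2.2))
      else if label == "neutral" then
        ((st.1.1, st.1.2.1 ++ [(pySplitSpace (PySem.Str.lower (pyDelPunct text)), label ++ "_" ++ PySem.Int.toStr (neu_start + st.2.2.1))], st.1.2.2),
         (st.2.1, st.2.2.1 + 1, st.2.2.2))
      else if label == "negative" then
        ((st.1.1, st.1.2.1, st.1.2.2 ++ [(pySplitSpace (PySem.Str.lower (pyDelPunct text)), label ++ "_" ++ PySem.Int.toStr (neg_start + st.2.2.2))]),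
         (st.2.1, st.2.2.1, st.2.2.2 + 1))
      else st)
    (([], [], []), (0, 0, 0))
  let tagged := st.1.1 ++ st.1.2.1 ++ st.1.2.2
  (tagged.map (fun t => t.1), tagged.map (fun t => t.2))

-- ===== PRECONDITION & SPEC =====
def Spec_process_for_doc2vec (tweets : List String) (labels : List String) (pos_start : Int) (neu_start : Int) (neg_start : Int) (out : List (List String) × List String) : Prop := out = process_for_doc2vec_alt tweets labels pos_start neu_start neg_start
instance (tweets : List String) (labels : List String) (pos_start : Int) (neu_start : Int) (neg_start : Int) (out : List (List String) × List String) : Decidable (Spec_process_for_doc2vec tweets labels pos_start neu_start neg_start out) := by unfold Spec_process_for_doc2vec; infer_instance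

-- ===== CLAIM =====
def Claim_equal_process_for_doc2vec : Prop := ∀ (tweets : List String) (labels : List String) (pos_start : Int) (neu_start : Int) (neg_start : Int), Dom_process_for_doc2vec tweets labels pos_start neu_start neg_start → Spec_process_for_doc2vec tweets labels pos_start neu_start neg_start (process_for_doc2vec tweets labels pos_start neu_start neg_start)

-- ===== LEMMAS AND PROOFS =====

-- canonical middle form: the retagged group starting at index s (without tokenization)
def pvTag (s : Int) : List (String × String) → List (String × String)
  | [] => []
  | t :: r => (t.1, t.2 ++ "_" ++ PySem.Int.toStr s) :: pvTag (s + 1) r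

def pvTok (t : String) : List String := pySplitSpace (PySem.Str.lower (pyDelPunct t))

-- A's selection fold = three filters
lemma pv_sel (l : List (String × String)) :
    ∀ (s : Int) (acc : List (String × String) × List (String × String) × List (String × String)),
    (PySem.List.enumerate l s).foldl
      (fun (acc : List (String × String) × List (String × String) × List (String × String)) it =>
        let t := it.2
        let acc := if t.2 == "positive" then (acc.1 ++ [t], acc.2.1, acc.2.2) else acc
        let acc := if t.2 == "neutral" then (acc.1, acc.2.1 ++ [t], acc.2.2) else acc
        if t.2 == "negative" then (acc.1, acc.2.1, acc.2.2 ++ [t]) else acc)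
      acc
    = (acc.1 ++ l.filter (fun t => t.2 == "positive"),
       acc.2.1 ++ l.filter (fun t => t.2 == "neutral"),
       acc.2.2 ++ l.filter (fun t => t.2 == "negative")) := by
  induction l with
  | nil => intro s acc; simp [PySem.List.enumerate_nil]
  | cons t r ih =>
    intro s acc
    rw [PySem.List.enumerate_cons, List.foldl_cons, ih]
    by_cases hp : t.2 = "positive"
    · simp [hp]
    · by_cases hu : t.2 = "neutral"
      · simp [hu]
      · by_cases hg : t.2 = "negative"
        · simp [hg]
        · simp [hp, hu, hg]

-- A's enumerate-retag fold = pvTag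
lemma pv_retag (start : Int) (l : List (String × String)) :
    ∀ (s : Int) (acc : List (String × String)),
    (PySem.List.enumerate l s).foldl
      (fun acc (p : Int × (String × String)) => acc ++ [(p.2.1, p.2.2 ++ "_" ++ PySem.Int.toStr (start + p.1))]) acc
    = acc ++ pvTag (start + s) l := by
  induction l with
  | nil => intro s acc; simp [PySem.List.enumerate_nil, pvTag]
  | cons t r ih =>
    intro s acc
    rw [PySem.List.enumerate_cons]
    simp only [List.foldl_cons, pvTag]
    rw [ih]
    simp [List.append_assoc, add_assoc]

-- B's single fold with counters = three tokenized pvTag groups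
lemma pv_fold_b (ps ns gs : Int) (l : List (String × String)) :
    ∀ (st0 : (List (List String × String) × List (List String × String) × List (List String × String)) × (Int × Int × Int)),
    (l.foldl
      (fun (st : (List (List String × String) × List (List String × String) × List (List String × String)) × (Int × Int × Int)) tl =>
        let text := tl.1; let label := tl.2
        if label == "positive" then
          ((st.1.1 ++ [(pySplitSpace (PySem.Str.lower (pyDelPunct text)), label ++ "_" ++ PySem.Int.toStr (ps + st.2.1))], st.1.2.1, st.1.2.2),
           (st.2.1 + 1, st.2.2.1, st.2.2.2))
        else if label == "neutral" then
          ((st.1.1, st.1.2.1 ++ [(pySplitSpace (PySem.Str.lower (pyDelPunct text)), label ++ "_" ++ PySem.Int.toStr (ns + st.2.2.1))], st.1.2.2),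
           (st.2.1, st.2.2.1 + 1, st.2.2.2))
        else if label == "negative" then
          ((st.1.1, st.1.2.1, st.1.2.2 ++ [(pySplitSpace (PySem.Str.lower (pyDelPunct text)), label ++ "_" ++ PySem.Int.toStr (gs + st.2.2.2))]),
           (st.2.1, st.2.2.1, st.2.2.2 + 1))
        else st)
      st0).1
    = (st0.1.1 ++ (pvTag (ps + st0.2.1) (l.filter (fun t => t.2 == "positive"))).map (fun t => (pvTok t.1, t.2)),
       st0.1.2.1 ++ (pvTag (ns + st0.2.2.1) (l.filter (fun t => t.2 == "neutral"))).map (fun t => (pvTok t.1, t.2)),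
       st0.1.2.2 ++ (pvTag (gs + st0.2.2.2) (l.filter (fun t => t.2 == "negative"))).map (fun t => (pvTok t.1, t.2))) := by
  induction l with
  | nil => intro st0; simp [pvTag]
  | cons t r ih =>
    intro st0
    rw [List.foldl_cons, ih]
    by_cases hp : t.2 = "positive"
    · simp [hp, pvTag, pvTok, List.append_assoc, add_assoc]
    · by_cases hu : t.2 = "neutral"
      · simp [hu, pvTag, pvTok, List.append_assoc, add_assoc]
      · by_cases hg : t.2 = "negative"
        · simp [hg, pvTag, pvTok, List.append_assoc, add_assoc]
        · simp [hp, hu, hg]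

-- ===== VERDICT =====
theorem process_for_doc2vec_spec : Claim_equal_process_for_doc2vec := by
  intro tweets labels ps ns gs _
  unfold Spec_process_for_doc2vec process_for_doc2vec process_for_doc2vec_alt
  simp only [pv_sel, pv_fold_b, List.nil_append, add_zero]
  rw [pv_retag, pv_retag, pv_retag]
  simp only [List.nil_append, add_zero,
    PySem.List.foldl_append_singleton_eq_map]
  simp [Function.comp_def, pvTok]
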